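-- pv_equiv track=rewrite | github.com/tassaron/muffin-mash | mash/__main__.py | create_tables_of_contents
-- ===== SOURCE A (Python) =====
-- def supported_ext(ext: str):
--     return ext in [".md", ".html"]
--
-- def create_tables_of_contents(config, working_files):
--     working_files.sort()
--     toc = {}
--     for dir, filename, ext in working_files:
--         if not supported_ext(ext) or dir.startswith("."):
--             continue
--         if dir not in toc:
--             toc[dir] = []
--         if filename == "index" and (
--             dir == ""
--             or dir not in config["folders"]
--             or not config["folders"][dir]["embeddable"]
--         ):
--             continue
--         toc[dir].append(filename)
--     for key in toc:
--         toc[key].sort()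
--     return toc
-- ===== SOURCE B (Python) =====
-- from itertools import groupby
--
--
-- def supported_ext(ext: str):
--     return ext in [".md", ".html"]
--
--
-- def _index_skipped(config, dir):
--     return (
--         dir == ""
--         or dir not in config["folders"]
--         or not config["folders"][dir]["embeddable"]
--     )
--
--
-- def create_tables_of_contents(config, working_files):
--     working_files.sort()
--     toc = {}
--     for dir, group in groupby(working_files, key=lambda t: t[0]):
--         if dir.startswith("."):
--             continue
--         supported = [(f, e) for _, f, e in group if supported_ext(e)]
--         if not supported:
--             continue
--         toc[dir] = [
--             f for f, e in supported
--             if not (f == "index" and _index_skipped(config, dir))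
--         ]
--     return toc
-- ===== Notes on version B (the rewrite author's own statement) =====
-- stated objective: alternative
-- what changed: Instead of building dict buckets file-by-file with membership tests and a final per-key sort pass, B sorts once and splits the sorted list into contiguous per-directory groups with itertools.groupby, emitting each directory's (already ordered) bucket in one shot, so the bucket-creation test, the append loop and the per-key sorting pass disappear.
import Mathlib
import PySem

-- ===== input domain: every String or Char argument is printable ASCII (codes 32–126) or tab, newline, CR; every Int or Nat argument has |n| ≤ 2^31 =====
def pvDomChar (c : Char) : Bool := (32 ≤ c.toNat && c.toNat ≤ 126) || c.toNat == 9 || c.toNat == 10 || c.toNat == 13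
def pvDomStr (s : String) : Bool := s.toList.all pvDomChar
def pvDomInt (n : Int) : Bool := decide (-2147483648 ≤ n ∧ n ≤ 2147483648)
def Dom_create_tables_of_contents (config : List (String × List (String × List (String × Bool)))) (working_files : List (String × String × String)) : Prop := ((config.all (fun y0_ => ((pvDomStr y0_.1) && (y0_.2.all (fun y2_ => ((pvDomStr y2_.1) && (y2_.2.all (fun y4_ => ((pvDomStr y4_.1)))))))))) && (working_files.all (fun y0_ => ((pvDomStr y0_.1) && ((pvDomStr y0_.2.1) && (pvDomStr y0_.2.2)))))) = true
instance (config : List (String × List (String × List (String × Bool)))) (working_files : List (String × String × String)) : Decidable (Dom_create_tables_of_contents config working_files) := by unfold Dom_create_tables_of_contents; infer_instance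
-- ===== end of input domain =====

-- B replaces A's element-wise dict building (per-element membership test, append, and a final
-- per-key sorting pass) by one groupby-style split of the sorted list into contiguous
-- per-directory groups, each bucket emitted in one shot; the equivalence proved is about the
-- RETURN value (both Pythons also sort working_files in place, identically).

-- ===== PORT A =====
-- Python's `ext in [".md", ".html"]` (helper shared by both programs)
def supported_ext (ext : String) : Bool := [".md", ".html"].contains ext

-- the skip condition `dir == "" or dir not in config["folders"] or not
-- config["folders"][dir]["embeddable"]` (the identical expression appears in A inline and in
-- B's helper _index_skipped). The dict lookups are rendered total with `getD`; Pre_ guarantees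
-- that every lookup Python actually performs succeeds, so this is exact under Pre_.
def index_skipped (config : List (String × List (String × List (String × Bool)))) (dir : String) : Bool :=
  dir == "" ||
    (let folders := (PySem.Dict.get? (PySem.Dict.mk config) "folders").getD []
     !((PySem.Dict.mk folders).contains dir) ||
       !(((PySem.Dict.get? (PySem.Dict.mk ((PySem.Dict.get? (PySem.Dict.mk folders) dir).getD [])) "embeddable").getD false)))

-- `working_files.sort()`: Python sorts (str, str, str) tuples lexicographically; ported by hand
-- as a sort keyed by the lexicographic product order (exact: Lean's String order is
-- code-point lexicographic, like Python's). Shared by both ports (both Pythons do this sort).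
def wfKey (t : String × String × String) : Lex (String × Lex (String × String)) :=
  toLex (t.1, toLex (t.2.1, t.2.2))

def sortWF (working_files : List (String × String × String)) : List (String × String × String) :=
  PySem.List.sorted working_files wfKey

-- the body of A's first `for dir, filename, ext in working_files` loop
def ctocStep (config : List (String × List (String × List (String × Bool))))
    (toc : PySem.Dict String (List String)) (t : String × String × String) :
    PySem.Dict String (List String) :=
  if !(supported_ext t.2.2) || PySem.Str.startswith t.1 "." then toc
  else
    let toc := if toc.contains t.1 then toc else toc.insert t.1 []
    if t.2.1 == "index" && index_skipped config t.1 then toc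
    else toc.modify t.1 [] (fun v => v ++ [t.2.1])

def create_tables_of_contents (config : List (String × List (String × List (String × Bool)))) (working_files : List (String × String × String)) : List (String × List String) :=
  let wf := sortWF working_files
  let toc := wf.foldl (ctocStep config) PySem.Dict.empty
  -- `for key in toc: toc[key].sort()`, then return toc
  toc.items.map (fun p => (p.1, PySem.List.sorted p.2 (fun x => x)))

-- ===== PORT B =====
-- itertools.groupby(working_files, key=lambda t: t[0]) with each group materialized
def pyGroupbyDir : List (String × String × String) → List (String × List (String × String × String))
  | [] => []
  | t :: ts =>
    (t.1, t :: ts.takeWhile (fun u => u.1 == t.1)) :: pyGroupbyDir (ts.dropWhile (fun u => u.1 == t.1))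
termination_by l => l.length
decreasing_by simpa using Nat.lt_succ_of_le (List.length_dropWhile_le _ _)

-- the body of B's `for dir, group in groupby(...)` loop
def ctocGroupStep (config : List (String × List (String × List (String × Bool))))
    (toc : PySem.Dict String (List String)) (g : String × List (String × String × String)) :
    PySem.Dict String (List String) :=
  if PySem.Str.startswith g.1 "." then toc
  else
    let supported := (g.2.filter (fun t => supported_ext t.2.2)).map (fun t => (t.2.1, t.2.2))
    if supported.isEmpty then toc
    else toc.insert g.1
      ((supported.filter (fun fe => !(fe.1 == "index" && index_skipped config g.1))).map (fun fe => fe.1))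

def create_tables_of_contents_alt (config : List (String × List (String × List (String × Bool)))) (working_files : List (String × String × String)) : List (String × List String) :=
  let wf := sortWF working_files
  ((pyGroupbyDir wf).foldl (ctocGroupStep config) PySem.Dict.empty).items

-- ===== PRECONDITION & SPEC =====
-- Bool check that the config lookups Python performs for an "index" file in directory `dir`
-- all succeed (config["folders"] exists and, if dir is a key of it, so does its "embeddable").
def cfg_ok (config : List (String × List (String × List (String × Bool)))) (dir : String) : Bool :=
  match PySem.Dict.get? (PySem.Dict.mk config) "folders" with
  | none => false
  | some folders =>
    match PySem.Dict.get? (PySem.Dict.mk folders) dir with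
    | none => true
    | some m => (PySem.Dict.get? (PySem.Dict.mk m) "embeddable").isSome

-- Pre_ excludes exactly the inputs on which the Python A raises KeyError: a supported,
-- non-hidden file named "index" in a nonempty directory makes A look up config["folders"]
-- (and, when dir is a key of it, ["embeddable"]); both lookups must succeed.
def Pre_create_tables_of_contents (config : List (String × List (String × List (String × Bool)))) (working_files : List (String × String × String)) : Prop :=
  ∀ t ∈ working_files, supported_ext t.2.2 = true → PySem.Str.startswith t.1 "." = false →
    t.2.1 = "index" → t.1 ≠ "" → cfg_ok config t.1 = true
instance (config : List (String × List (String × List (String × Bool)))) (working_files : List (String × String × String)) : Decidable (Pre_create_tables_of_contents config working_files) := by unfold Pre_create_tables_of_contents; infer_instance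

def pvWitness_create_tables_of_contents : (List (String × List (String × List (String × Bool)))) × (List (String × String × String)) :=
  ([("folders", [("docs", [("embeddable", true)])])],
   [("docs", "index", ".md"), ("docs", "a", ".md"), ("", "readme", ".html"),
    (".git", "x", ".md"), ("docs", "b", ".txt")])

def Spec_create_tables_of_contents (config : List (String × List (String × List (String × Bool)))) (working_files : List (String × String × String)) (out : List (String × List String)) : Prop := out = create_tables_of_contents_alt config working_files
instance (config : List (String × List (String × List (String × Bool)))) (working_files : List (String × String × String)) (out : List (String × List String)) : Decidable (Spec_create_tables_of_contents config working_files out) := by unfold Spec_create_tables_of_contents; infer_instance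

-- ===== CLAIM (what is proved, stated in full; the proofs are below) =====
def Claim_equal_create_tables_of_contents : Prop := ∀ (config : List (String × List (String × List (String × Bool)))) (working_files : List (String × String × String)), Dom_create_tables_of_contents config working_files → Pre_create_tables_of_contents config working_files → Spec_create_tables_of_contents config working_files (create_tables_of_contents config working_files)

-- ===== LEMMAS AND PROOFS =====

-- the items A appends (and B keeps) for directory d out of a run g of files all in d
def itemsOf (config : List (String × List (String × List (String × Bool)))) (d : String)
    (g : List (String × String × String)) : List String :=
  ((g.filter (fun t => supported_ext t.2.2)).filter
      (fun t => !(t.2.1 == "index" && index_skipped config d))).map (fun t => t.2.1)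

-- the common group-by-group shape of both folds over a key-sorted list
def canon (config : List (String × List (String × List (String × Bool)))) :
    List (String × String × String) → List (String × List String)
  | [] => []
  | t :: ts =>
    if PySem.Str.startswith t.1 "." ||
        ((t :: ts.takeWhile (fun u => u.1 == t.1)).filter (fun u => supported_ext u.2.2)).isEmpty
    then canon config (ts.dropWhile (fun u => u.1 == t.1))
    else (t.1, itemsOf config t.1 (t :: ts.takeWhile (fun u => u.1 == t.1))) ::
      canon config (ts.dropWhile (fun u => u.1 == t.1))
termination_by l => l.length
decreasing_by all_goals simpa using Nat.lt_succ_of_le (List.length_dropWhile_le _ _)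

theorem dcontains_append_last (pre : List (String × List String)) (d : String) (cur : List String) :
    (PySem.Dict.mk (pre ++ [(d, cur)])).contains d = true := by
  simp [PySem.Dict.contains]

theorem dgetD_append_last (pre : List (String × List String)) (d : String) (cur : List String)
    (h : ∀ p ∈ pre, p.1 ≠ d) :
    (PySem.Dict.mk (pre ++ [(d, cur)])).getD d [] = cur := by
  have hf : pre.find? (fun p => p.1 == d) = none := by
    rw [List.find?_eq_none]
    intro p hp
    simpa using h p hp
  simp [PySem.Dict.getD, PySem.Dict.get?, List.find?_append, hf]

theorem dinsert_append_last (pre : List (String × List String)) (d : String) (cur v : List String)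
    (h : ∀ p ∈ pre, p.1 ≠ d) :
    (PySem.Dict.mk (pre ++ [(d, cur)])).insert d v = PySem.Dict.mk (pre ++ [(d, v)]) := by
  simp only [PySem.Dict.insert, dcontains_append_last, if_pos]
  congr 1
  rw [List.map_append]
  simp only [List.map_cons, List.map_nil, beq_self_eq_true, if_pos]
  congr 1
  conv_rhs => rw [← List.map_id pre]
  apply List.map_congr_left
  intro p hp
  simp [h p hp]

theorem dmodify_append_last (pre : List (String × List String)) (d : String) (cur : List String)
    (f : List String → List String) (h : ∀ p ∈ pre, p.1 ≠ d) :
    (PySem.Dict.mk (pre ++ [(d, cur)])).modify d [] f = PySem.Dict.mk (pre ++ [(d, f cur)]) := by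
  rw [PySem.Dict.modify, dgetD_append_last pre d cur h, dinsert_append_last pre d cur (f cur) h]

theorem innerA4 (config : List (String × List (String × List (String × Bool)))) (d : String)
    (hd : PySem.Str.startswith d "." = false) :
    ∀ (g' : List (String × String × String)) (pre : List (String × List String)) (cur : List String),
      (∀ u ∈ g', u.1 = d) → (∀ p ∈ pre, p.1 ≠ d) →
      g'.foldl (ctocStep config) (PySem.Dict.mk (pre ++ [(d, cur)])) =
        PySem.Dict.mk (pre ++ [(d, cur ++ itemsOf config d g')]) := by
  have hdc : PySem.Chars.startswith d.toList ['.'] = false := by simpa using hd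
  intro g'
  induction g' with
  | nil => intro pre cur _ _; simp [itemsOf]
  | cons u g'' ih =>
    obtain ⟨ud, uf, ue⟩ := u
    intro pre cur hg hpre
    have hu : ud = d := hg _ List.mem_cons_self
    subst hu
    have hg'' : ∀ v ∈ g'', v.1 = ud := fun v hv => hg v (List.mem_cons_of_mem _ hv)
    by_cases hs : supported_ext ue = true
    · by_cases hidx : uf = "index"
      · subst hidx
        by_cases hskb : index_skipped config ud = true
        · have hstep : ctocStep config (PySem.Dict.mk (pre ++ [(ud, cur)]))
              (ud, "index", ue) = PySem.Dict.mk (pre ++ [(ud, cur)]) := by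
            simp [ctocStep, hs, hdc, hskb]
          have hit : itemsOf config ud ((ud, "index", ue) :: g'') = itemsOf config ud g'' := by
            simp [itemsOf, hs, hskb]
          rw [List.foldl_cons, hstep, hit, ih pre cur hg'' hpre]
        · have hstep : ctocStep config (PySem.Dict.mk (pre ++ [(ud, cur)])) (ud, "index", ue) =
              PySem.Dict.mk (pre ++ [(ud, cur ++ ["index"])]) := by
            simp [ctocStep, hs, hdc, hskb,
              dmodify_append_last pre ud cur _ hpre]
          have hit : itemsOf config ud ((ud, "index", ue) :: g'') =
              "index" :: itemsOf config ud g'' := by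
            simp [itemsOf, hs, hskb]
          rw [List.foldl_cons, hstep, ih pre (cur ++ ["index"]) hg'' hpre, hit]
          simp
      · have hstep : ctocStep config (PySem.Dict.mk (pre ++ [(ud, cur)])) (ud, uf, ue) =
            PySem.Dict.mk (pre ++ [(ud, cur ++ [uf])]) := by
          simp [ctocStep, hs, hdc, hidx,
            dmodify_append_last pre ud cur _ hpre]
        have hit : itemsOf config ud ((ud, uf, ue) :: g'') = uf :: itemsOf config ud g'' := by
          simp [itemsOf, hs, hidx]
        rw [List.foldl_cons, hstep, ih pre (cur ++ [uf]) hg'' hpre, hit]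
        simp
    · have hstep : ctocStep config (PySem.Dict.mk (pre ++ [(ud, cur)])) (ud, uf, ue) =
          PySem.Dict.mk (pre ++ [(ud, cur)]) := by
        simp [ctocStep, hs]
      have hit : itemsOf config ud ((ud, uf, ue) :: g'') = itemsOf config ud g'' := by
        simp [itemsOf, hs]
      rw [List.foldl_cons, hstep, hit, ih pre cur hg'' hpre]

theorem dcontains_false_keys (acc : PySem.Dict String (List String)) (d : String)
    (h : acc.contains d = false) : ∀ p ∈ acc.items, p.1 ≠ d := by
  intro p hp
  simp only [PySem.Dict.contains, List.any_eq_false] at h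
  simpa using h p hp

theorem innerA_skip (config : List (String × List (String × List (String × Bool)))) :
    ∀ (g' : List (String × String × String)) (acc : PySem.Dict String (List String)),
      (∀ u ∈ g', PySem.Str.startswith u.1 "." = true) →
      g'.foldl (ctocStep config) acc = acc := by
  intro g'
  induction g' with
  | nil => intro acc _; rfl
  | cons u g'' ih =>
    intro acc hg
    have hu : PySem.Str.startswith u.1 "." = true := hg u List.mem_cons_self
    have hu' : PySem.Chars.startswith u.1.toList ['.'] = true := by simpa using hu
    have hstep : ctocStep config acc u = acc := by
      simp [ctocStep, hu']
    rw [List.foldl_cons, hstep, ih acc (fun v hv => hg v (List.mem_cons_of_mem _ hv))]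

theorem innerA3 (config : List (String × List (String × List (String × Bool)))) (d : String)
    (hd : PySem.Str.startswith d "." = false) :
    ∀ (g' : List (String × String × String)) (acc : PySem.Dict String (List String)),
      (∀ u ∈ g', u.1 = d) → acc.contains d = false →
      g'.foldl (ctocStep config) acc =
        if (g'.filter (fun u => supported_ext u.2.2)).isEmpty then acc
        else PySem.Dict.mk (acc.items ++ [(d, itemsOf config d g')]) := by
  have hdc : PySem.Chars.startswith d.toList ['.'] = false := by simpa using hd
  intro g'
  induction g' with
  | nil => intro acc _ _; simp
  | cons u g'' ih =>
    obtain ⟨ud, uf, ue⟩ := u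
    intro acc hg hacc
    have hu : ud = d := hg _ List.mem_cons_self
    subst hu
    have hg'' : ∀ v ∈ g'', v.1 = ud := fun v hv => hg v (List.mem_cons_of_mem _ hv)
    have hpre : ∀ p ∈ acc.items, p.1 ≠ ud := dcontains_false_keys acc ud hacc
    by_cases hs : supported_ext ue = true
    · -- bucket is created here
      have hins : acc.insert ud [] = PySem.Dict.mk (acc.items ++ [(ud, [])]) := by
        have := PySem.Dict.items_insert_of_not_contains acc ([] : List String) hacc
        exact PySem.Dict.ext this
      have hnotempty :
          (((ud, uf, ue) :: g'').filter (fun u => supported_ext u.2.2)).isEmpty = false := by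
        simp [hs]
      rw [List.foldl_cons, hnotempty]
      by_cases hidx : uf = "index"
      · subst hidx
        by_cases hskb : index_skipped config ud = true
        · have hstep : ctocStep config acc (ud, "index", ue) =
              PySem.Dict.mk (acc.items ++ [(ud, [])]) := by
            simp [ctocStep, hs, hdc, hacc, hskb, hins]
          have hit : itemsOf config ud ((ud, "index", ue) :: g'') = itemsOf config ud g'' := by
            simp [itemsOf, hs, hskb]
          rw [hstep, innerA4 config ud hd g'' acc.items [] hg'' hpre, hit]
          simp
        · have hstep : ctocStep config acc (ud, "index", ue) =
              PySem.Dict.mk (acc.items ++ [(ud, ["index"])]) := by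
            simp [ctocStep, hs, hdc, hacc, hskb, hins,
              dmodify_append_last acc.items ud [] _ hpre]
          have hit : itemsOf config ud ((ud, "index", ue) :: g'') =
              "index" :: itemsOf config ud g'' := by
            simp [itemsOf, hs, hskb]
          rw [hstep, innerA4 config ud hd g'' acc.items ["index"] hg'' hpre, hit]
          simp
      · have hstep : ctocStep config acc (ud, uf, ue) =
            PySem.Dict.mk (acc.items ++ [(ud, [uf])]) := by
          simp [ctocStep, hs, hdc, hacc, hidx, hins,
            dmodify_append_last acc.items ud [] _ hpre]
        have hit : itemsOf config ud ((ud, uf, ue) :: g'') = uf :: itemsOf config ud g'' := by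
          simp [itemsOf, hs, hidx]
        rw [hstep, innerA4 config ud hd g'' acc.items [uf] hg'' hpre, hit]
        simp
    · have hstep : ctocStep config acc (ud, uf, ue) = acc := by
        simp [ctocStep, hs]
      have hfil : List.filter (fun u => supported_ext u.2.2) ((ud, uf, ue) :: g'') =
          List.filter (fun u => supported_ext u.2.2) g'' := by
        rw [List.filter_cons_of_neg]
        simpa using hs
      have hit : itemsOf config ud ((ud, uf, ue) :: g'') = itemsOf config ud g'' := by
        simp [itemsOf, hs]
      rw [List.foldl_cons, hstep, ih acc hg'' hacc, hfil, hit]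

theorem key_fst_le {t u : String × String × String} (h : wfKey t ≤ wfKey u) : t.1 ≤ u.1 := by
  rw [wfKey, wfKey, Prod.Lex.le_iff] at h
  rcases h with h | ⟨h, _⟩
  · exact le_of_lt h
  · exact le_of_eq h

theorem key_snd_le {t u : String × String × String} (h : wfKey t ≤ wfKey u) (h2 : t.1 = u.1) :
    t.2.1 ≤ u.2.1 := by
  rw [wfKey, wfKey, Prod.Lex.le_iff] at h
  rcases h with h | ⟨h, h3⟩
  · exact absurd h2 (ne_of_lt h)
  · rw [Prod.Lex.le_iff] at h3
    rcases h3 with h3 | ⟨h3, _⟩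
    · exact le_of_lt h3
    · exact le_of_eq h3

theorem group_dirs (t : String × String × String) (ts : List (String × String × String)) :
    ∀ u ∈ t :: ts.takeWhile (fun u => u.1 == t.1), u.1 = t.1 := by
  intro u hu
  rcases List.mem_cons.mp hu with h | h
  · rw [h]
  · simpa using List.mem_takeWhile_imp h

theorem group_pairwise (t : String × String × String) (ts : List (String × String × String))
    (hpw : (t :: ts).Pairwise (fun a b => wfKey a ≤ wfKey b)) :
    (t :: ts.takeWhile (fun u => u.1 == t.1)).Pairwise (fun a b => wfKey a ≤ wfKey b) := by
  exact hpw.sublist ((ts.takeWhile_sublist _).cons₂ t)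

theorem rest_pairwise (t : String × String × String) (ts : List (String × String × String))
    (hpw : (t :: ts).Pairwise (fun a b => wfKey a ≤ wfKey b)) :
    (ts.dropWhile (fun u => u.1 == t.1)).Pairwise (fun a b => wfKey a ≤ wfKey b) := by
  exact hpw.sublist ((ts.dropWhile_sublist _).trans (List.sublist_cons_self t ts))

theorem rest_ne (t : String × String × String) (ts : List (String × String × String))
    (hpw : (t :: ts).Pairwise (fun a b => wfKey a ≤ wfKey b)) :
    ∀ u ∈ ts.dropWhile (fun u => u.1 == t.1), u.1 ≠ t.1 := by
  intro u hu
  rcases List.pairwise_cons.mp hpw with ⟨hts, _⟩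
  cases hr : ts.dropWhile (fun u => u.1 == t.1) with
  | nil => rw [hr] at hu; cases hu
  | cons v r' =>
    have hne : v.1 ≠ t.1 := by
      have h1 : ts.dropWhile (fun u => u.1 == t.1) ≠ [] := by simp [hr]
      have h2 := List.head_dropWhile_not (fun u : String × String × String => u.1 == t.1) h1
      have h3 : (ts.dropWhile (fun u : String × String × String => u.1 == t.1)).head h1 = v := by
        simp [hr]
      rw [h3] at h2
      simpa using h2
    have hvmem : v ∈ ts := by
      have hv : v ∈ ts.dropWhile (fun u => u.1 == t.1) := by
        rw [hr]; exact List.mem_cons_self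
      exact (ts.dropWhile_sublist _).mem hv
    have htv : t.1 < v.1 := lt_of_le_of_ne (key_fst_le (hts v hvmem)) (Ne.symm hne)
    rw [hr] at hu
    rcases List.mem_cons.mp hu with h | h
    · rw [h]; exact hne
    · have hdpw := rest_pairwise t ts hpw
      rw [hr] at hdpw
      rcases List.pairwise_cons.mp hdpw with ⟨hvr, _⟩
      have : v.1 ≤ u.1 := key_fst_le (hvr u h)
      exact ne_of_gt (lt_of_lt_of_le htv this)

theorem dcontains_append (xs : List (String × List String)) (d k : String) (v : List String) :
    (PySem.Dict.mk (xs ++ [(d, v)])).contains k = ((PySem.Dict.mk xs).contains k || (d == k)) := by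
  simp [PySem.Dict.contains, List.any_append]

theorem foldA_canon (config : List (String × List (String × List (String × Bool)))) :
    ∀ (n : Nat) (l : List (String × String × String)), l.length ≤ n →
      ∀ (acc : PySem.Dict String (List String)),
      l.Pairwise (fun a b => wfKey a ≤ wfKey b) →
      (∀ u ∈ l, acc.contains u.1 = false) →
      (l.foldl (ctocStep config) acc).items = acc.items ++ canon config l := by
  intro n
  induction n with
  | zero =>
    intro l hl acc _ _
    rw [List.length_eq_zero_iff.mp (Nat.le_zero.mp hl)]
    simp [canon]
  | succ n ih =>
    intro l hl acc hpw hfresh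
    cases l with
    | nil => simp [canon]
    | cons t ts =>
      have hgd := group_dirs t ts
      have hsplit : t :: ts = (t :: ts.takeWhile (fun u => u.1 == t.1)) ++
          ts.dropWhile (fun u => u.1 == t.1) := by
        rw [List.cons_append, List.takeWhile_append_dropWhile]
      have hrlen : (ts.dropWhile (fun u => u.1 == t.1)).length ≤ n := by
        have := List.length_dropWhile_le (fun u => u.1 == t.1) ts
        simp at hl
        omega
      have hrpw := rest_pairwise t ts hpw
      have hrne := rest_ne t ts hpw
      have hrsub : ∀ u ∈ ts.dropWhile (fun u => u.1 == t.1), u ∈ t :: ts := fun u hu =>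
        List.mem_cons_of_mem t ((ts.dropWhile_sublist _).mem hu)
      by_cases hhid : PySem.Str.startswith t.1 "." = true
      · have hhidc : PySem.Chars.startswith t.1.toList ['.'] = true := by simpa using hhid
        have hcanon : canon config (t :: ts) =
            canon config (ts.dropWhile (fun u => u.1 == t.1)) := by
          rw [canon]
          simp [hhidc]
        rw [hcanon]
        conv_lhs => rw [hsplit]
        rw [List.foldl_append,
          innerA_skip config _ acc (fun u hu => (hgd u hu) ▸ hhid)]
        exact ih _ hrlen acc hrpw (fun u hu => hfresh u (hrsub u hu))
      · have hhid' : PySem.Str.startswith t.1 "." = false := by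
          simpa using hhid
        have hhidc : PySem.Chars.startswith t.1.toList ['.'] = false := by simpa using hhid'
        have hacc : acc.contains t.1 = false := hfresh t List.mem_cons_self
        conv_lhs => rw [hsplit]
        rw [List.foldl_append,
          innerA3 config t.1 hhid' _ acc hgd hacc]
        by_cases hemp :
            ((t :: ts.takeWhile (fun u => u.1 == t.1)).filter
              (fun u => supported_ext u.2.2)).isEmpty = true
        · have hcanon : canon config (t :: ts) =
              canon config (ts.dropWhile (fun u => u.1 == t.1)) := by
            rw [canon]
            simp [hemp]
          rw [if_pos hemp, hcanon]
          exact ih _ hrlen acc hrpw (fun u hu => hfresh u (hrsub u hu))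
        · have hcanon : canon config (t :: ts) =
              (t.1, itemsOf config t.1 (t :: ts.takeWhile (fun u => u.1 == t.1))) ::
                canon config (ts.dropWhile (fun u => u.1 == t.1)) := by
            rw [canon]
            simp [hemp, hhidc]
          rw [if_neg hemp, hcanon]
          have hfresh' : ∀ u ∈ ts.dropWhile (fun u => u.1 == t.1),
              (PySem.Dict.mk (acc.items ++
                [(t.1, itemsOf config t.1 (t :: ts.takeWhile (fun u => u.1 == t.1)))])).contains u.1 = false := by
            intro u hu
            rw [dcontains_append]
            have h1 : acc.contains u.1 = false := hfresh u (hrsub u hu)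
            have h2 : (t.1 == u.1) = false :=
              beq_eq_false_iff_ne.mpr (fun he => hrne u hu he.symm)
            rw [h1, h2]
            rfl
          rw [ih _ hrlen _ hrpw hfresh']
          simp

theorem foldB_canon (config : List (String × List (String × List (String × Bool)))) :
    ∀ (n : Nat) (l : List (String × String × String)), l.length ≤ n →
      ∀ (acc : PySem.Dict String (List String)),
      l.Pairwise (fun a b => wfKey a ≤ wfKey b) →
      (∀ u ∈ l, acc.contains u.1 = false) →
      ((pyGroupbyDir l).foldl (ctocGroupStep config) acc).items = acc.items ++ canon config l := by
  intro n
  induction n with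
  | zero =>
    intro l hl acc _ _
    rw [List.length_eq_zero_iff.mp (Nat.le_zero.mp hl)]
    simp [pyGroupbyDir, canon]
  | succ n ih =>
    intro l hl acc hpw hfresh
    cases l with
    | nil => simp [pyGroupbyDir, canon]
    | cons t ts =>
      have hgd := group_dirs t ts
      have hrlen : (ts.dropWhile (fun u => u.1 == t.1)).length ≤ n := by
        have := List.length_dropWhile_le (fun u => u.1 == t.1) ts
        simp at hl
        omega
      have hrpw := rest_pairwise t ts hpw
      have hrne := rest_ne t ts hpw
      have hrsub : ∀ u ∈ ts.dropWhile (fun u => u.1 == t.1), u ∈ t :: ts := fun u hu =>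
        List.mem_cons_of_mem t ((ts.dropWhile_sublist _).mem hu)
      rw [pyGroupbyDir, List.foldl_cons]
      by_cases hhid : PySem.Str.startswith t.1 "." = true
      · have hhidc : PySem.Chars.startswith t.1.toList ['.'] = true := by simpa using hhid
        have hstep : ctocGroupStep config acc (t.1, t :: ts.takeWhile (fun u => u.1 == t.1)) =
            acc := by
          simp [ctocGroupStep, hhidc]
        have hcanon : canon config (t :: ts) =
            canon config (ts.dropWhile (fun u => u.1 == t.1)) := by
          rw [canon]
          simp [hhidc]
        rw [hstep, hcanon]
        exact ih _ hrlen acc hrpw (fun u hu => hfresh u (hrsub u hu))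
      · have hhid' : PySem.Str.startswith t.1 "." = false := by simpa using hhid
        have hhidc : PySem.Chars.startswith t.1.toList ['.'] = false := by simpa using hhid'
        have hacc : acc.contains t.1 = false := hfresh t List.mem_cons_self
        by_cases hemp :
            ((t :: ts.takeWhile (fun u => u.1 == t.1)).filter
              (fun u => supported_ext u.2.2)).isEmpty = true
        · have hstep : ctocGroupStep config acc (t.1, t :: ts.takeWhile (fun u => u.1 == t.1)) =
              acc := by
            simp [ctocGroupStep, hhidc, hemp]
          have hcanon : canon config (t :: ts) =
              canon config (ts.dropWhile (fun u => u.1 == t.1)) := by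
            rw [canon]
            simp [hemp]
          rw [hstep, hcanon]
          exact ih _ hrlen acc hrpw (fun u hu => hfresh u (hrsub u hu))
        · have hstep : ctocGroupStep config acc (t.1, t :: ts.takeWhile (fun u => u.1 == t.1)) =
              acc.insert t.1
                (itemsOf config t.1 (t :: ts.takeWhile (fun u => u.1 == t.1))) := by
            simp only [ctocGroupStep]
            rw [if_neg (by simp [hhidc])]
            rw [if_neg (by simpa [List.isEmpty_map] using hemp)]
            congr 1
            simp [itemsOf, List.filter_map, List.map_map, Function.comp]
          have hcanon : canon config (t :: ts) =
              (t.1, itemsOf config t.1 (t :: ts.takeWhile (fun u => u.1 == t.1))) ::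
                canon config (ts.dropWhile (fun u => u.1 == t.1)) := by
            rw [canon]
            simp [hemp, hhidc]
          have hfresh' : ∀ u ∈ ts.dropWhile (fun u => u.1 == t.1),
              (acc.insert t.1
                (itemsOf config t.1 (t :: ts.takeWhile (fun u => u.1 == t.1)))).contains u.1 = false := by
            intro u hu
            rw [PySem.Dict.contains_insert]
            have h1 : acc.contains u.1 = false := hfresh u (hrsub u hu)
            have h2 : (u.1 == t.1) = false := beq_eq_false_iff_ne.mpr (hrne u hu)
            rw [h1, h2]
            rfl
          rw [hstep, ih _ hrlen _ hrpw hfresh'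
            ,
            PySem.Dict.items_insert_of_not_contains acc _ hacc, hcanon]
          simp

theorem canon_sorted (config : List (String × List (String × List (String × Bool)))) :
    ∀ (n : Nat) (l : List (String × String × String)), l.length ≤ n →
      l.Pairwise (fun a b => wfKey a ≤ wfKey b) →
      (canon config l).map (fun p => (p.1, PySem.List.sorted p.2 (fun x => x))) = canon config l := by
  intro n
  induction n with
  | zero =>
    intro l hl _
    rw [List.length_eq_zero_iff.mp (Nat.le_zero.mp hl)]
    simp [canon]
  | succ n ih =>
    intro l hl hpw
    cases l with
    | nil => simp [canon]
    | cons t ts =>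
      have hrlen : (ts.dropWhile (fun u => u.1 == t.1)).length ≤ n := by
        have := List.length_dropWhile_le (fun u => u.1 == t.1) ts
        simp at hl
        omega
      have hrpw := rest_pairwise t ts hpw
      by_cases hc : (PySem.Str.startswith t.1 "." ||
          ((t :: ts.takeWhile (fun u => u.1 == t.1)).filter
            (fun u => supported_ext u.2.2)).isEmpty) = true
      · have hcanon : canon config (t :: ts) =
            canon config (ts.dropWhile (fun u => u.1 == t.1)) := by
          rw [canon]
          rw [if_pos (by simpa using hc)]
        rw [hcanon]
        exact ih _ hrlen hrpw
      · have hcanon : canon config (t :: ts) =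
            (t.1, itemsOf config t.1 (t :: ts.takeWhile (fun u => u.1 == t.1))) ::
              canon config (ts.dropWhile (fun u => u.1 == t.1)) := by
          rw [canon]
          rw [if_neg (by simpa using hc)]
        have hgp := group_pairwise t ts hpw
        have h1 : (t :: ts.takeWhile (fun u => u.1 == t.1)).Pairwise
            (fun a b => a.2.1 ≤ b.2.1) := by
          refine hgp.imp_of_mem ?_
          intro a b ha hb hr
          exact key_snd_le hr (by rw [group_dirs t ts a ha, group_dirs t ts b hb])
        have h2 : (itemsOf config t.1 (t :: ts.takeWhile (fun u => u.1 == t.1))).Pairwise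
            (· ≤ ·) := by
          rw [itemsOf]
          exact List.pairwise_map.mpr ((h1.filter _).filter _)
        rw [hcanon, List.map_cons,
          PySem.List.sorted_eq_self_of_pairwise _ _ h2, ih _ hrlen hrpw]

-- ===== VERDICT (by name: the statement is the Claim_ definition above) =====
theorem create_tables_of_contents_spec : Claim_equal_create_tables_of_contents := by
  intro config working_files _ _
  unfold Spec_create_tables_of_contents
  simp only [create_tables_of_contents, create_tables_of_contents_alt]
  have hpw : (sortWF working_files).Pairwise (fun a b => wfKey a ≤ wfKey b) :=
    PySem.List.sorted_pairwise working_files wfKey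
  have hfresh : ∀ u ∈ sortWF working_files,
      (PySem.Dict.empty : PySem.Dict String (List String)).contains u.1 = false := by
    intro u _
    rfl
  rw [foldA_canon config (sortWF working_files).length _ le_rfl _ hpw hfresh,
    foldB_canon config (sortWF working_files).length _ le_rfl _ hpw hfresh]
  simpa using canon_sorted config (sortWF working_files).length _ le_rfl hpw
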